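-- pv_equiv track=rewrite | github.com/yjqiang/nlp-beginner | task04/utils/utils.py | pad_sentences_char
-- ===== SOURCE A (Python) =====
-- from typing import List
--
-- def pad_sentences_char(sentences: List[List[List[int]]], char_pad_token: int) -> List[List[List[int]]]:
--     """ Pad list of sentences according to the longest sentence in the batch and longest words in all sentences.
--     :param sentences: list of sentences（每个单词用一个 List[int] 代替，每个 int 都是一个 char）, result of `words2charindices()` from `vocab.py`
--     :param char_pad_token: index of the character-padding token，即 char "<pad>" 的 index
--
--     :return sentences_padded: Output shape: (N, max_sentence_len, max_word_len)
--     """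
--
--     sentences_padded = []
--     max_word_len = max(len(word) for sentence in sentences for word in sentence)  # 单个单词最长的长度
--     max_sentence_len = max(len(sentence) for sentence in sentences)  # 最长句子的长度
--
--     for sentence in sentences:
--         sentence_padded = []
--         # 处理单词
--         for word in sentence:
--             word_padded = word + [char_pad_token] * (max_word_len-len(word))  # 短单词之后，填充 "pad" 字符(max_word_len)
--             sentence_padded.append(word_padded)
--
--         # 处理句子，[char_pad_token]*max_word_len 就是一个“空单词”，使用空单词来填充句子
--         sentence_padded = sentence_padded + [[char_pad_token]*max_word_len] * (max_sentence_len - len(sentence_padded))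
--         sentences_padded.append(sentence_padded)
--
--     return sentences_padded
-- ===== SOURCE B (Python) =====
-- from typing import List
--
-- def pad_sentences_char(sentences: List[List[List[int]]], char_pad_token: int) -> List[List[List[int]]]:
--     max_word_len = max(len(word) for sentence in sentences for word in sentence)
--     max_sentence_len = max(len(sentence) for sentence in sentences)
--     return [
--         [
--             [sentence[j][k] if j < len(sentence) and k < len(sentence[j]) else char_pad_token
--              for k in range(max_word_len)]
--             for j in range(max_sentence_len)
--         ]
--         for sentence in sentences
--     ]
-- ===== Notes on version B (the rewrite author's own statement) =====
-- stated objective: alternative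
-- what changed: B replaces A's append-of-pad-suffixes construction (word + pad*k, then pad-word rows appended per sentence) with a pure index-grid comprehension: every output cell (i,j,k) is computed directly as sentences[i][j][k] if in range else char_pad_token.
import Mathlib
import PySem

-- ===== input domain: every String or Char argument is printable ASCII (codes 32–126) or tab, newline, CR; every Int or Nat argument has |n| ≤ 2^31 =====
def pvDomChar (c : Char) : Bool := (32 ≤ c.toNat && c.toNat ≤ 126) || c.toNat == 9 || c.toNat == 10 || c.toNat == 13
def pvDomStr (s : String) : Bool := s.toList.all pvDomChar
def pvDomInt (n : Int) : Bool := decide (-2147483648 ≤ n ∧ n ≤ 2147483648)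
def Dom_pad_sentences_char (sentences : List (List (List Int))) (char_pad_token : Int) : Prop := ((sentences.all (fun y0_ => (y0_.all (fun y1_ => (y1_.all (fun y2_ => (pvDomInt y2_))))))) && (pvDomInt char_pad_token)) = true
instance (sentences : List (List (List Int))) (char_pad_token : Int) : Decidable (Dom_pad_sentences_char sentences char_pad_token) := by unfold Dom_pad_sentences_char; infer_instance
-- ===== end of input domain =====

-- B builds each padded row by pure indexing over a full (max_sentence_len × max_word_len) index
-- grid instead of A's append-of-pad-suffixes; same return value on all inputs where A returns.

-- ===== PORT A =====
-- Python `max(...)` over an empty generator raises ValueError (List.max? = none); Pre_ excludes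
-- exactly those inputs, so the `.getD 0` default is never reached under Pre_.
def pad_sentences_char (sentences : List (List (List Int))) (char_pad_token : Int) : List (List (List Int)) :=
  let max_word_len := ((sentences.flatMap (fun sentence => sentence.map List.length)).max?).getD 0
  let max_sentence_len := ((sentences.map List.length).max?).getD 0
  sentences.foldl (fun sentences_padded sentence =>
    let sentence_padded :=
      sentence.foldl (fun sentence_padded word =>
        sentence_padded ++ [word ++ List.replicate (max_word_len - word.length) char_pad_token]) []
    let sentence_padded :=
      sentence_padded ++ List.replicate (max_sentence_len - sentence.length)
        (List.replicate max_word_len char_pad_token)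
    sentences_padded ++ [sentence_padded]) []

-- ===== PORT B =====
-- Python range(n) over the nonnegative indices 0..n-1 is List.range n; sentence[j]/word[k] are
-- guarded by the bounds test, so the in-range List.getD equals Python's indexing exactly.
def pad_sentences_char_alt (sentences : List (List (List Int))) (char_pad_token : Int) : List (List (List Int)) :=
  let max_word_len := ((sentences.flatMap (fun sentence => sentence.map List.length)).max?).getD 0
  let max_sentence_len := ((sentences.map List.length).max?).getD 0
  sentences.map (fun sentence =>
    (List.range max_sentence_len).map (fun j =>
      (List.range max_word_len).map (fun k =>
        if j < sentence.length ∧ k < (sentence.getD j []).length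
        then (sentence.getD j []).getD k 0 else char_pad_token)))

-- ===== PRECONDITION & SPEC =====
-- Pre_ excludes exactly the inputs with no word at all (empty batch, or all sentences empty),
-- on which Python's max() raises ValueError in A (and in B alike).
def Pre_pad_sentences_char (sentences : List (List (List Int))) (char_pad_token : Int) : Prop :=
  sentences.flatMap (fun sentence => sentence) ≠ []
instance (sentences : List (List (List Int))) (char_pad_token : Int) : Decidable (Pre_pad_sentences_char sentences char_pad_token) := by unfold Pre_pad_sentences_char; infer_instance

def pvWitness_pad_sentences_char : List (List (List Int)) × Int := ([[[1, 2], [3]], [[4]]], 0)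

def Spec_pad_sentences_char (sentences : List (List (List Int))) (char_pad_token : Int) (out : List (List (List Int))) : Prop := out = pad_sentences_char_alt sentences char_pad_token
instance (sentences : List (List (List Int))) (char_pad_token : Int) (out : List (List (List Int))) : Decidable (Spec_pad_sentences_char sentences char_pad_token out) := by unfold Spec_pad_sentences_char; infer_instance

-- ===== CLAIM (what is proved, stated in full; the proofs are below) =====
def Claim_equal_pad_sentences_char : Prop := ∀ (sentences : List (List (List Int))) (char_pad_token : Int), Dom_pad_sentences_char sentences char_pad_token → Pre_pad_sentences_char sentences char_pad_token → Spec_pad_sentences_char sentences char_pad_token (pad_sentences_char sentences char_pad_token)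

-- ===== LEMMAS AND PROOFS =====

-- An index-grid row of length n over xs (length ≤ n) is xs mapped, then padded with P.
theorem range_map_pad {α β : Type} (d : α) (G : α → β) (P : β) :
    ∀ (xs : List α) (n : Nat), xs.length ≤ n →
      (List.range n).map (fun j => if j < xs.length then G (xs.getD j d) else P)
        = xs.map G ++ List.replicate (n - xs.length) P := by
  intro xs
  induction xs with
  | nil =>
      intro n _
      simp [List.map_const']
  | cons a xs ih =>
      intro n hn
      cases n with
      | zero => simp at hn
      | succ m =>
          rw [List.range_succ_eq_map]
          simp only [List.map_cons, List.map_map]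
          have h0 : (if 0 < (a :: xs).length then G ((a :: xs).getD 0 d) else P) = G a := by
            simp
          rw [h0]
          have htail : (List.range m).map ((fun j => if j < (a :: xs).length then G ((a :: xs).getD j d) else P) ∘ (· + 1))
              = (List.range m).map (fun j => if j < xs.length then G (xs.getD j d) else P) := by
            apply List.map_congr_left
            intro j _
            simp only [Function.comp_apply, List.length_cons, List.getD_cons_succ,
              Nat.add_lt_add_iff_right]
          rw [htail, ih m (by simp only [List.length_cons] at hn; omega)]
          simp

theorem max?_getD_le {n : Nat} {l : List Nat} (h : n ∈ l) : n ≤ l.max?.getD 0 := by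
  cases hm : l.max? with
  | none => rw [List.max?_eq_none_iff] at hm; simp [hm] at h
  | some m => simpa using (List.max?_eq_some_iff.mp hm).2 n h

-- ===== VERDICT (by name: the statement is the Claim_ definition above) =====
theorem pad_sentences_char_spec : Claim_equal_pad_sentences_char := by
  intro sentences char_pad_token _ _
  unfold Spec_pad_sentences_char pad_sentences_char pad_sentences_char_alt
  simp only []
  set mw := ((sentences.flatMap (fun sentence => sentence.map List.length)).max?).getD 0 with hmw
  set ms := ((sentences.map List.length).max?).getD 0 with hms
  rw [PySem.List.foldl_append_singleton_eq_map]
  apply List.map_congr_left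
  intro s hs
  rw [PySem.List.foldl_append_singleton_eq_map]
  have hslen : s.length ≤ ms := by
    apply max?_getD_le
    exact List.mem_map.mpr ⟨s, hs, rfl⟩
  have houter :
      (List.range ms).map (fun j =>
        (List.range mw).map (fun k =>
          if j < s.length ∧ k < (s.getD j []).length then (s.getD j []).getD k 0 else char_pad_token))
      = (List.range ms).map (fun j =>
          if j < s.length
          then (fun w => (List.range mw).map (fun k => if k < w.length then w.getD k 0 else char_pad_token)) (s.getD j [])
          else List.replicate mw char_pad_token) := by
    apply List.map_congr_left
    intro j _
    by_cases hj : j < s.length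
    · simp [hj]
    · simp [hj, List.map_const']
  rw [houter,
    range_map_pad [] (fun w => (List.range mw).map (fun k => if k < w.length then w.getD k 0 else char_pad_token)) (List.replicate mw char_pad_token) s ms hslen]
  congr 1
  apply List.map_congr_left
  intro w hw
  have hwlen : w.length ≤ mw := by
    apply max?_getD_le
    exact List.mem_flatMap.mpr ⟨s, hs, List.mem_map.mpr ⟨w, hw, rfl⟩⟩
  have h2 := range_map_pad 0 (fun x => x) char_pad_token w mw hwlen
  simpa using h2.symm
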